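-- pv_equiv track=rewrite | github.com/jwparsons/DeepReads | goodreads_genre_data.py | description_filter
-- ===== SOURCE A (Python) =====
-- import string
--
-- valid_lower = {'a', 'b', 'c', 'd', 'e', 'f', 'g', 'h', 'i', 'j', 'k', 'l', 'm', 'n', 'o', 'p', 'q', 'r', 's', 't', 'u', 'v', 'w', 'x', 'y', 'z'}
--
-- valid_upper = {'A', 'B', 'C', 'D', 'E', 'F', 'G', 'H', 'I', 'J', 'K', 'L', 'M', 'N', 'O', 'P', 'Q', 'R', 'S', 'T', 'U', 'V', 'W', 'X', 'Y', 'Z'}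
--
-- def description_filter(description):
--     # remove html
--     filter_1 = ''
--     is_open = False
--     for i in range(len(description)):
--         letter = description[i]
--         if is_open:
--             if letter == '>':
--                 is_open = False
--                 filter_1 += ' '
--         else:
--             if letter == '<':
--                 is_open = True
--             else:
--                 filter_1 += letter
--
--     # check for any crazy characters
--     filter_2 = ''
--     for i in range(len(filter_1)):
--         letter = filter_1[i]
--         if is_alpha(letter):
--             filter_2 += letter
--         else:
--             if letter in string.punctuation or letter == ' ':
--                 filter_2 += letter
--             else:
--                 filter_2 += ' '
--
--     # remove multiple white space and .com's
--     word_split = filter_2.split()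
--     word_filter = []
--     for word in word_split:
--         if '.com' in word:
--             continue
--         else:
--             word_filter.append(word)
--     filter_3 = ' '.join(word_filter)
--
--     return filter_3
--
-- def is_alpha(letter):
--     if letter in valid_lower:
--         return True
--     elif letter in valid_upper:
--         return True
--     return False
-- ===== SOURCE B (Python) =====
-- import string
--
-- def description_filter(description):
--     # single scan: strip tags and classify characters in one pass
--     buf = []
--     is_open = False
--     for ch in description:
--         if is_open:
--             if ch == '>':
--                 is_open = False
--                 buf.append(' ')
--         elif ch == '<':
--             is_open = True
--         elif 'a' <= ch <= 'z' or 'A' <= ch <= 'Z' or ch in string.punctuation or ch == ' ':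
--             buf.append(ch)
--         else:
--             buf.append(' ')
--     return ' '.join(w for w in ''.join(buf).split() if '.com' not in w)
-- ===== Notes on version B (the rewrite author's own statement) =====
-- stated objective: simpler
-- what changed: A's two separate character passes (HTML-tag stripping, then character whitelisting) are fused into one character scan maintaining the is_open flag that classifies each kept character immediately into a list buffer, followed by the same split/drop-.com/join word step written as a filter comprehension.
import Mathlib
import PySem

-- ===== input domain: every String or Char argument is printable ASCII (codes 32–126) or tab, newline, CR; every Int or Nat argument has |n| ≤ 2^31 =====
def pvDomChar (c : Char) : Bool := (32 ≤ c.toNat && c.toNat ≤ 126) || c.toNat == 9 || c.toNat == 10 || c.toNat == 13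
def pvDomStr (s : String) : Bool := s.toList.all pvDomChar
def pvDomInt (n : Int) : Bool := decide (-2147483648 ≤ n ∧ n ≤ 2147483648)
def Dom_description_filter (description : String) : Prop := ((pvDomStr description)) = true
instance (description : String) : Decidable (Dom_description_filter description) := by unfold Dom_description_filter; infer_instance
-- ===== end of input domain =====

-- B fuses A's two character passes (tag stripping, then character whitelisting) into one scan; objective: simpler.

-- ===== PORT A =====
-- string.punctuation (shared module constant both Pythons reference)
def pvPunctuation : List Char := "!\"#$%&'()*+,-./:;<=>?@[\\]^_`{|}~".toList

def pvValidLower : PySem.Set Char :=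
  PySem.Set.ofList ['a','b','c','d','e','f','g','h','i','j','k','l','m','n','o','p','q','r','s','t','u','v','w','x','y','z']

def pvValidUpper : PySem.Set Char :=
  PySem.Set.ofList ['A','B','C','D','E','F','G','H','I','J','K','L','M','N','O','P','Q','R','S','T','U','V','W','X','Y','Z']

def pvIsAlpha (letter : Char) : Bool :=
  if PySem.Set.contains pvValidLower letter then true
  else if PySem.Set.contains pvValidUpper letter then true
  else false

def description_filter (description : String) : String :=
  -- remove html
  let p1 := description.toList.foldl
    (fun (st : List Char × Bool) letter =>
      if st.2 then
        if letter = '>' then (st.1 ++ [' '], false) else (st.1, st.2)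
      else
        if letter = '<' then (st.1, true) else (st.1 ++ [letter], st.2))
    ([], false)
  let filter1 := p1.1
  -- check for any crazy characters
  let filter2 := filter1.foldl
    (fun acc letter =>
      if pvIsAlpha letter then acc ++ [letter]
      else if pvPunctuation.contains letter || letter = ' ' then acc ++ [letter]
      else acc ++ [' '])
    []
  -- remove multiple white space and .com's
  let wordSplit := PySem.Chars.split₀ filter2
  let wordFilter := wordSplit.foldl
    (fun acc word => if PySem.Chars.isIn ".com".toList word then acc else acc ++ [word]) []
  String.ofList (PySem.Chars.join [' '] wordFilter)

-- ===== PORT B =====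
-- B's single scan: strip tags and classify characters in one pass (loop ported as structural recursion)
def pvScan : Bool → List Char → List Char
  | _, [] => []
  | true, c :: cs => if c = '>' then ' ' :: pvScan false cs else pvScan true cs
  | false, c :: cs =>
      if c = '<' then pvScan true cs
      else if (('a' ≤ c && c ≤ 'z') || ('A' ≤ c && c ≤ 'Z')
               || pvPunctuation.contains c || c = ' ') then c :: pvScan false cs
      else ' ' :: pvScan false cs

def description_filter_alt (description : String) : String :=
  let buf := pvScan false description.toList
  String.ofList (PySem.Chars.join [' ']
    ((PySem.Chars.split₀ buf).filter (fun w => !PySem.Chars.isIn ".com".toList w)))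

-- ===== PRECONDITION & SPEC =====
def Spec_description_filter (description : String) (out : String) : Prop := out = description_filter_alt description
instance (description : String) (out : String) : Decidable (Spec_description_filter description out) := by unfold Spec_description_filter; infer_instance

-- ===== CLAIM (what is proved, stated in full; the proofs are below) =====
def Claim_equal_description_filter : Prop := ∀ (description : String), Dom_description_filter description → Spec_description_filter description (description_filter description)

-- ===== LEMMAS AND PROOFS =====

-- spine of A's first pass: the characters it emits, without the accumulator
def pvEmit : Bool → List Char → List Char
  | _, [] => []
  | true, c :: cs => if c = '>' then ' ' :: pvEmit false cs else pvEmit true cs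
  | false, c :: cs => if c = '<' then pvEmit true cs else c :: pvEmit false cs

-- the character classification of A's second pass
def pvClassify (c : Char) : Char :=
  if pvIsAlpha c then c
  else if pvPunctuation.contains c || c = ' ' then c
  else ' '

theorem pvFoldl1_eq (cs : List Char) : ∀ (acc : List Char) (op : Bool),
    (cs.foldl (fun (st : List Char × Bool) letter =>
      if st.2 then
        if letter = '>' then (st.1 ++ [' '], false) else (st.1, st.2)
      else
        if letter = '<' then (st.1, true) else (st.1 ++ [letter], st.2))
      (acc, op)).1 = acc ++ pvEmit op cs := by
  induction cs with
  | nil => intro acc op; simp [pvEmit]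
  | cons c cs ih =>
    intro acc op
    cases op
    · by_cases h : c = '<' <;> simp [List.foldl, pvEmit, h, ih]
    · by_cases h : c = '>' <;> simp [List.foldl, pvEmit, h, ih]

theorem pvFoldl2_eq (l : List Char) : ∀ (acc : List Char),
    (l.foldl (fun acc letter =>
      if pvIsAlpha letter then acc ++ [letter]
      else if pvPunctuation.contains letter || letter = ' ' then acc ++ [letter]
      else acc ++ [' ']) acc) = acc ++ l.map pvClassify := by
  induction l with
  | nil => intro acc; simp
  | cons c cs ih =>
    intro acc
    simp only [List.foldl, List.map, pvClassify]
    split_ifs <;> rw [ih] <;> simp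

theorem pv_lower_eq (c : Char) (h1 : 97 ≤ c.toNat) (h2 : c.toNat ≤ 122) :
    PySem.Set.contains pvValidLower c = true := by
  interval_cases h : c.toNat <;>
    (have hc := (Char.ofNat_toNat c).symm; rw [h] at hc; subst hc; decide)

theorem pv_upper_eq (c : Char) (h1 : 65 ≤ c.toNat) (h2 : c.toNat ≤ 90) :
    PySem.Set.contains pvValidUpper c = true := by
  interval_cases h : c.toNat <;>
    (have hc := (Char.ofNat_toNat c).symm; rw [h] at hc; subst hc; decide)

-- A's set-membership alpha test coincides with B's range test, for every character
theorem pvIsAlpha_eq (c : Char) :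
    pvIsAlpha c = (('a' ≤ c && c ≤ 'z') || ('A' ≤ c && c ≤ 'Z')) := by
  by_cases hlo : 97 ≤ c.toNat ∧ c.toNat ≤ 122
  · rw [pvIsAlpha, pv_lower_eq c hlo.1 hlo.2]
    simp [Char.le_def, UInt32.le_iff_toNat_le]
    omega
  · by_cases hhi : 65 ≤ c.toNat ∧ c.toNat ≤ 90
    · rw [pvIsAlpha, pv_upper_eq c hhi.1 hhi.2]
      have : PySem.Set.contains pvValidLower c = false := by
        by_contra hb
        rw [Bool.not_eq_false, PySem.Set.contains] at hb
        have hmem : c ∈ pvValidLower := List.contains_iff_mem.mp hb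
        have hbnd : ∀ x ∈ pvValidLower, 97 ≤ x.toNat ∧ x.toNat ≤ 122 := by
          have hlit : ∀ x ∈ (['a','b','c','d','e','f','g','h','i','j','k','l','m','n','o','p','q','r','s','t','u','v','w','x','y','z'] : List Char), 97 ≤ x.toNat ∧ x.toNat ≤ 122 := by
            intro x hx; fin_cases hx <;> decide
          intro x hx
          exact hlit x (by rw [show (['a','b','c','d','e','f','g','h','i','j','k','l','m','n','o','p','q','r','s','t','u','v','w','x','y','z'] : List Char) = pvValidLower from by decide]; exact hx)
        exact hlo (hbnd c hmem)
      rw [this]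
      simp [Char.le_def, UInt32.le_iff_toNat_le]
      omega
    · have hl : PySem.Set.contains pvValidLower c = false := by
        by_contra hb
        rw [Bool.not_eq_false, PySem.Set.contains] at hb
        have hmem := List.contains_iff_mem.mp hb
        have hbnd : ∀ x ∈ pvValidLower, 97 ≤ x.toNat ∧ x.toNat ≤ 122 := by
          have hlit : ∀ x ∈ (['a','b','c','d','e','f','g','h','i','j','k','l','m','n','o','p','q','r','s','t','u','v','w','x','y','z'] : List Char), 97 ≤ x.toNat ∧ x.toNat ≤ 122 := by
            intro x hx; fin_cases hx <;> decide
          intro x hx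
          exact hlit x (by rw [show (['a','b','c','d','e','f','g','h','i','j','k','l','m','n','o','p','q','r','s','t','u','v','w','x','y','z'] : List Char) = pvValidLower from by decide]; exact hx)
        exact hlo (hbnd c hmem)
      have hu : PySem.Set.contains pvValidUpper c = false := by
        by_contra hb
        rw [Bool.not_eq_false, PySem.Set.contains] at hb
        have hmem := List.contains_iff_mem.mp hb
        have hbnd : ∀ x ∈ pvValidUpper, 65 ≤ x.toNat ∧ x.toNat ≤ 90 := by
          have hlit : ∀ x ∈ (['A','B','C','D','E','F','G','H','I','J','K','L','M','N','O','P','Q','R','S','T','U','V','W','X','Y','Z'] : List Char), 65 ≤ x.toNat ∧ x.toNat ≤ 90 := by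
            intro x hx; fin_cases hx <;> decide
          intro x hx
          exact hlit x (by rw [show (['A','B','C','D','E','F','G','H','I','J','K','L','M','N','O','P','Q','R','S','T','U','V','W','X','Y','Z'] : List Char) = pvValidUpper from by decide]; exact hx)
        exact hhi (hbnd c hmem)
      rw [pvIsAlpha, hl, hu]
      simp [Char.le_def, UInt32.le_iff_toNat_le]
      omega

-- B's fused scan = A's tag-stripping pass followed by A's classification pass
theorem pvScan_eq (cs : List Char) : ∀ (op : Bool),
    pvScan op cs = (pvEmit op cs).map pvClassify := by
  induction cs with
  | nil => intro op; cases op <;> simp [pvScan, pvEmit]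
  | cons c cs ih =>
    intro op
    cases op
    · by_cases h : c = '<'
      · simp [pvScan, pvEmit, h, ih]
      · simp only [pvScan, pvEmit, if_neg h, List.map]
        rw [ih]
        simp only [pvClassify, pvIsAlpha_eq]
        split_ifs <;> simp_all
    · by_cases h : c = '>'
      · simp only [pvScan, pvEmit, if_pos h, List.map]
        rw [ih]
        congr 1
      · simp [pvScan, pvEmit, h, ih]

-- A's word-filtering loop is a List.filter
theorem pvWords_eq (ws : List (List Char)) :
    ws.foldl (fun acc word => if PySem.Chars.isIn ".com".toList word then acc else acc ++ [word]) [] =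
      ws.filter (fun w => !PySem.Chars.isIn ".com".toList w) := by
  have hfun : (fun (acc : List (List Char)) word =>
        if PySem.Chars.isIn ".com".toList word then acc else acc ++ [word]) =
      (fun acc word => if (!PySem.Chars.isIn ".com".toList word) = true then acc ++ [word] else acc) := by
    funext acc word
    cases PySem.Chars.isIn ".com".toList word <;> simp
  rw [hfun]
  simpa using PySem.List.foldl_append_if_eq_filter
    (p := fun w => (!PySem.Chars.isIn ".com".toList w) = true)
    (l := ws) (acc := [])

-- ===== VERDICT (by name: the statement is the Claim_ definition above) =====
theorem description_filter_spec : Claim_equal_description_filter := by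
  intro description _
  unfold Spec_description_filter description_filter description_filter_alt
  dsimp only
  rw [pvFoldl1_eq, pvFoldl2_eq, pvScan_eq, pvWords_eq]
  simp
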